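-- pv_equiv track=rewrite | github.com/daezzato/Codewars | py/flick.py | flick_switch
-- ===== SOURCE A (Python) =====
-- def flick_switch(lst):
-- 	new_lst = []
-- 	toggle = True
-- 	for word in lst:
-- 		if word == 'flick':
-- 			toggle = not(toggle)
-- 		new_lst.append(toggle)
--
-- 	return new_lst
-- ===== SOURCE B (Python) =====
-- def flick_switch(lst):
--     # pass 1: prefix counts of 'flick'; pass 2: map parity (even count => True)
--     counts = []
--     c = 0
--     for word in lst:
--         c += (word == 'flick')
--         counts.append(c)
--     return [c % 2 == 0 for c in counts]
-- ===== Notes on version B (the rewrite author's own statement) =====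
-- stated objective: alternative
-- what changed: Replaces the running-boolean toggle loop with a prefix-count pass (number of 'flick's seen so far) followed by a parity-mapping pass (even count = True).
import Mathlib
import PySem

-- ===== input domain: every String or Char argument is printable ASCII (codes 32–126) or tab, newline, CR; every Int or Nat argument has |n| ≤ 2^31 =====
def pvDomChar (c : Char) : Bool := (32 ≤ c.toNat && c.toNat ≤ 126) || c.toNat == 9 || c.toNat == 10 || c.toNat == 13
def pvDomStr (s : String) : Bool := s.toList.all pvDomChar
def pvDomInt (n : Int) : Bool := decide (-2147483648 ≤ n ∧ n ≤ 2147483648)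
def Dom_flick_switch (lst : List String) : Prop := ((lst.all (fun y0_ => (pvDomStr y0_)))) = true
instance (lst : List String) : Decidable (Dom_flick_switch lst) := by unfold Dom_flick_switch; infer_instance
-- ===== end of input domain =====

-- B replaces A's running-boolean toggle loop with two passes: prefix counts of 'flick', then parity mapping (alternative decomposition, same cost).

-- ===== PORT A =====
def flick_switch (lst : List String) : List Bool :=
  (lst.foldl (fun (st : List Bool × Bool) word =>
      let toggle := if word == "flick" then !st.2 else st.2
      (st.1 ++ [toggle], toggle)) ([], true)).1

-- ===== PORT B =====
-- prefix counts of 'flick' (pass 1 of Source B)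
def fsCounts : List String → Nat → List Nat
  | [], _ => []
  | w :: ws, c =>
    let c' := c + (if w == "flick" then 1 else 0)
    c' :: fsCounts ws c'

def flick_switch_alt (lst : List String) : List Bool :=
  (fsCounts lst 0).map (fun c => c % 2 == 0)

-- ===== PRECONDITION & SPEC =====
def Spec_flick_switch (lst : List String) (out : List Bool) : Prop := out = flick_switch_alt lst
instance (lst : List String) (out : List Bool) : Decidable (Spec_flick_switch lst out) := by unfold Spec_flick_switch; infer_instance

-- ===== CLAIM (what is proved, stated in full; the proofs are below) =====
def Claim_equal_flick_switch : Prop := ∀ (lst : List String), Dom_flick_switch lst → Spec_flick_switch lst (flick_switch lst)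

-- ===== LEMMAS AND PROOFS =====

-- loop invariant: A's fold from (acc, t) with t the parity of c extends acc by the parity map of the counts
lemma fs_loop (lst : List String) (acc : List Bool) (t : Bool) (c : Nat)
    (h : (c % 2 == 0) = t) :
    (lst.foldl (fun (st : List Bool × Bool) word =>
        let toggle := if word == "flick" then !st.2 else st.2
        (st.1 ++ [toggle], toggle)) (acc, t)).1
      = acc ++ (fsCounts lst c).map (fun c => c % 2 == 0) := by
  induction lst generalizing acc t c with
  | nil => simp [fsCounts]
  | cons w ws ih =>
    by_cases hw : (w == "flick") = true
    · have h' : ((c + 1) % 2 == 0) = !t := by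
        subst h
        rcases Nat.mod_two_eq_zero_or_one c with hc | hc <;>
          simp [Nat.add_mod, hc]
      simp only [List.foldl_cons, fsCounts, List.map_cons, hw, if_true]
      rw [ih (acc ++ [!t]) (!t) (c + 1) h']
      simp [h']
    · simp only [List.foldl_cons, fsCounts, List.map_cons, hw,
        Bool.false_eq_true, if_false, Nat.add_zero]
      rw [ih (acc ++ [t]) t c h]
      simp [← h]

-- ===== VERDICT (by name: the statement is the Claim_ definition above) =====
theorem flick_switch_spec : Claim_equal_flick_switch := by
  intro lst _
  unfold Spec_flick_switch flick_switch flick_switch_alt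
  simpa using fs_loop lst [] true 0 rfl
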